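-- pv_equiv track=rewrite | github.com/entr0pie/api-tamagochi | tamagochi/database/Authenticator.py | checkPostRequest
-- ===== SOURCE A (Python) =====
-- from typing import Dict, Tuple
--
-- def checkPostRequest(data: Dict[str, str], required_keys: Tuple[str], optional_keys: Tuple[str]=()) -> bool:
--     """Check if the content of a POST request matches with the
--     expected fields and values.
--
--     The 'data' argument refers to the JSON POST content,
--     usually gotten via request.get_json() Flask method.
--
--     The 'required_keys' is a tuple that needs to be in a
--     specific request (example: ('user', 'password'))
--
--     The 'optional_keys' stores the optional keys available for that
--     request (example: ('is_robot'))
--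
--     * Check if this function is really necessary *
--     """
--
--     all_keys = required_keys + optional_keys
--
--     data_keys = data.keys()
--
--     for r_key in required_keys:
--         if r_key not in data_keys:
--             return False
--
--     for d_key in data_keys:
--         if d_key not in all_keys:
--             return False
--
--     return True
-- ===== SOURCE B (Python) =====
-- def checkPostRequest(data, required_keys, optional_keys=()):
--     # Single pass over the request keys with a status table and a matched counter:
--     # each key must be in the table; first sight of a required key bumps the counter;
--     # accept iff the counter reaches the number of distinct required keys.
--     status = {}
--     for k in optional_keys:
--         status[k] = False
--     for k in required_keys:
--         status[k] = True
--     need = sum(status.values())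
--     count = 0
--     for k in data:
--         if k not in status:
--             return False
--         if status[k]:
--             status[k] = False
--             count += 1
--     return count == need
-- ===== Notes on version B (the rewrite author's own statement) =====
-- stated objective: alternative
-- what changed: Replaces A's two membership loops (required-in-data, data-in-allowed) by a single pass over the request keys against a precomputed status table, counting first sightings of required keys and comparing the count to the number of distinct required keys.
import Mathlib
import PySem

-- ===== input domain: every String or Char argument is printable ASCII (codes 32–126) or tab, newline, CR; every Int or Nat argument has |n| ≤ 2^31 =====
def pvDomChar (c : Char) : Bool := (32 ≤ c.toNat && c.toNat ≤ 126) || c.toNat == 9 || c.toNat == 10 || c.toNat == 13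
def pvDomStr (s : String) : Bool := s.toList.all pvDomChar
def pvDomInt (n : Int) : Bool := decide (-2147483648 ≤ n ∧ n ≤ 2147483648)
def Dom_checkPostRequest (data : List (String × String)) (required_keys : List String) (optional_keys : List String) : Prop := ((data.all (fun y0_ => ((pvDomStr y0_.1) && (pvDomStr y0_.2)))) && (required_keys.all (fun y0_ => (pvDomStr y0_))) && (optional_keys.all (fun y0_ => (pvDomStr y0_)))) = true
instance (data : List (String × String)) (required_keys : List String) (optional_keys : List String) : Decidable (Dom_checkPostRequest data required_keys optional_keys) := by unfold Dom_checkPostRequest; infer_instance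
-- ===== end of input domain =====

-- B replaces A's two membership loops by one pass over the request keys against a
-- precomputed status table, counting first sightings of required keys; objective: alternative.

-- ===== PORT A =====
-- 'for r_key in required_keys: if r_key not in data_keys: return False'
def pvReqLoop (data_keys : List String) : List String → Bool
  | [] => true
  | r_key :: rest => if data_keys.contains r_key then pvReqLoop data_keys rest else false

-- 'for d_key in data_keys: if d_key not in all_keys: return False'
def pvAllLoop (all_keys : List String) : List String → Bool
  | [] => true
  | d_key :: rest => if all_keys.contains d_key then pvAllLoop all_keys rest else false

def checkPostRequest (data : List (String × String)) (required_keys : List String) (optional_keys : List String) : Bool :=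
  let all_keys := required_keys ++ optional_keys
  let data_keys := data.map (fun kv => kv.1)
  if pvReqLoop data_keys required_keys then pvAllLoop all_keys data_keys else false

-- ===== PORT B =====
-- the two table-building loops of Source B
def pvBuildStatus (required_keys optional_keys : List String) : PySem.Dict String Bool :=
  let d0 := optional_keys.foldl (fun d k => d.insert k false) PySem.Dict.empty
  required_keys.foldl (fun d k => d.insert k true) d0

-- 'for k in data: …' with early return, carrying (status, count); final 'count == need'
def pvDataLoop (need : Int) : PySem.Dict String Bool → Int → List String → Bool
  | _, count, [] => count == need
  | status, count, k :: rest =>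
    match status.get? k with
    | none => false
    | some v =>
      if v then pvDataLoop need (status.insert k false) (count + 1) rest
      else pvDataLoop need status count rest

def checkPostRequest_alt (data : List (String × String)) (required_keys : List String) (optional_keys : List String) : Bool :=
  let status := pvBuildStatus required_keys optional_keys
  let need := (status.values.map (fun b => if b then (1 : Int) else 0)).sum
  pvDataLoop need status 0 (data.map (fun kv => kv.1))

-- ===== PRECONDITION & SPEC =====
def Spec_checkPostRequest (data : List (String × String)) (required_keys : List String) (optional_keys : List String) (out : Bool) : Prop := out = checkPostRequest_alt data required_keys optional_keys
instance (data : List (String × String)) (required_keys : List String) (optional_keys : List String) (out : Bool) : Decidable (Spec_checkPostRequest data required_keys optional_keys out) := by unfold Spec_checkPostRequest; infer_instance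

-- ===== CLAIM (what is proved, stated in full; the proofs are below) =====
def Claim_equal_checkPostRequest : Prop := ∀ (data : List (String × String)) (required_keys : List String) (optional_keys : List String), Dom_checkPostRequest data required_keys optional_keys → Spec_checkPostRequest data required_keys optional_keys (checkPostRequest data required_keys optional_keys)

-- ===== LEMMAS AND PROOFS =====

-- number of True entries still in the table
def pvTval (status : PySem.Dict String Bool) : Int :=
  ((status.items.filter (fun p => p.2)).length : Int)

theorem pvReqLoop_eq_all (dk : List String) (l : List String) :
    pvReqLoop dk l = l.all (fun k => dk.contains k) := by
  induction l with
  | nil => rfl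
  | cons k rest ih => cases h : dk.contains k <;> rw [pvReqLoop] <;> simp [ih]


theorem pvAllLoop_eq_all (ak : List String) (l : List String) :
    pvAllLoop ak l = l.all (fun k => ak.contains k) := by
  induction l with
  | nil => rfl
  | cons k rest ih => cases h : ak.contains k <;> rw [pvAllLoop] <;> simp [ih]

-- a constant-value insert loop: overwrite order is irrelevant
theorem pvGet_foldl_insert_const (l : List String) (v : Bool)
    (d : PySem.Dict String Bool) (k : String) :
    (l.foldl (fun d k => d.insert k v) d).get? k
      = if k ∈ l then some v else d.get? k := by
  induction l generalizing d with
  | nil => simp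
  | cons a rest ih =>
    simp only [List.foldl_cons, ih, PySem.Dict.get?_insert, List.mem_cons]
    by_cases hr : k ∈ rest <;> by_cases ha : k = a <;> simp [hr, ha]

theorem pvGet_buildStatus (req opt : List String) (k : String) :
    (pvBuildStatus req opt).get? k
      = if k ∈ req then some true else if k ∈ opt then some false else none := by
  simp [pvBuildStatus, pvGet_foldl_insert_const, PySem.Dict.get?_empty]

theorem pvNodup_buildStatus (req opt : List String) :
    (pvBuildStatus req opt).keys.Nodup := by
  unfold pvBuildStatus
  exact PySem.Dict.nodup_keys_foldl_insert _ _ _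
    (PySem.Dict.nodup_keys_foldl_insert _ _ _ PySem.Dict.nodup_keys_empty)

-- replacing the (unique) True entry at key k by False removes exactly one True item
theorem pvFilter_replace (l : List (String × Bool)) (k : String)
    (hnd : (l.map Prod.fst).Nodup) (hmem : (k, true) ∈ l) :
    ((l.map (fun p => if p.1 = k then (k, false) else p)).filter (fun p => p.2)).length + 1
      = (l.filter (fun p => p.2)).length := by
  induction l with
  | nil => simp at hmem
  | cons p rest ih =>
    simp only [List.map_cons, List.nodup_cons, List.mem_map] at hnd
    by_cases hk : p.1 = k
    · have hp : p = (k, true) := by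
        rcases List.mem_cons.mp hmem with h | h
        · exact h.symm
        · exact absurd ⟨(k, true), h, by simp [hk]⟩ hnd.1
      subst hp
      have hrest : rest.map (fun p => if p.1 = k then (k, false) else p) = rest := by
        have := List.map_congr_left (l := rest)
          (f := fun p : String × Bool => if p.1 = k then (k, false) else p) (g := id)
          (fun q hq => by
            have hq1 : q.1 ≠ k := fun h => hnd.1 ⟨q, hq, by simp [h]⟩
            simp [hq1])
        simpa using this
      simp [hrest]
    · have hmem' : (k, true) ∈ rest := by
        rcases List.mem_cons.mp hmem with h | h
        · exact absurd (by rw [← h]) hk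
        · exact h
      have := ih hnd.2 hmem'
      cases hp2 : p.2 <;> simp_all

theorem pvTval_insert_false (status : PySem.Dict String Bool) (k : String)
    (hnd : status.keys.Nodup) (h : status.get? k = some true) :
    pvTval (status.insert k false) + 1 = pvTval status := by
  have hc : status.contains k = true := by
    rw [PySem.Dict.contains_eq_isSome_get?, h]; rfl
  have hmem : (k, true) ∈ status.items := PySem.Dict.mem_items_of_get?_eq_some status h
  have hnd' : (status.items.map Prod.fst).Nodup := by
    simpa [PySem.Dict.keys] using hnd
  have hfun : (fun p : String × Bool => if p.1 == k then (k, false) else p)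
      = (fun p : String × Bool => if p.1 = k then (k, false) else p) := by
    funext p; by_cases hp : p.1 = k <;> simp [hp]
  have := pvFilter_replace status.items k hnd' hmem
  unfold pvTval
  rw [PySem.Dict.items_insert_of_contains _ _ hc, hfun]
  omega

theorem pvTval_zero_iff (status : PySem.Dict String Bool) (hnd : status.keys.Nodup) :
    pvTval status = 0 ↔ ∀ k, status.get? k ≠ some true := by
  unfold pvTval
  rw [show (((status.items.filter (fun p => p.2)).length : Int) = 0)
        ↔ status.items.filter (fun p => p.2) = [] by
      simp [List.length_eq_zero_iff]]
  rw [List.filter_eq_nil_iff]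
  constructor
  · intro h k hk
    have := h _ (PySem.Dict.mem_items_of_get?_eq_some status hk)
    simp at this
  · intro h p hp
    cases p with
    | mk pk pv =>
      cases pv
      · simp
      · exact absurd ((PySem.Dict.get?_eq_some_iff_mem_items status pk true hnd).mpr hp) (h pk)

-- the data loop: succeeds iff every key is in the table and every True key was visited
theorem pvDataLoop_char (l : List String) :
    ∀ (status : PySem.Dict String Bool) (count need : Int),
      status.keys.Nodup → need = count + pvTval status →
      (pvDataLoop need status count l = true
        ↔ (∀ k ∈ l, status.contains k = true) ∧ (∀ k, status.get? k = some true → k ∈ l)) := by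
  induction l with
  | nil =>
    intro status count need hnd hinv
    simp only [pvDataLoop]
    rw [show ((count == need) = true) ↔ count = need by simp]
    constructor
    · intro h
      refine ⟨by simp, fun k hk => ?_⟩
      have hz : pvTval status = 0 := by omega
      exact absurd hk ((pvTval_zero_iff status hnd).mp hz k)
    · rintro ⟨-, h2⟩
      have hz : pvTval status = 0 := (pvTval_zero_iff status hnd).mpr
        (fun k hk => by simpa using h2 k hk)
      omega
  | cons k rest ih =>
    intro status count need hnd hinv
    simp only [pvDataLoop]
    cases hget : status.get? k with
    | none =>
      have hc : status.contains k = false := by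
        rw [PySem.Dict.contains_eq_isSome_get?, hget]; rfl
      simp only [Bool.false_eq_true, false_iff, not_and]
      intro h
      exact absurd (h k (List.mem_cons_self)) (by simp [hc])
    | some v =>
      have hc : status.contains k = true := by
        rw [PySem.Dict.contains_eq_isSome_get?, hget]; rfl
      cases v with
      | false =>
        simp only [if_neg (Bool.false_ne_true)]
        rw [ih status count need hnd hinv]
        constructor
        · rintro ⟨h1, h2⟩
          refine ⟨fun k' hk' => ?_, fun k' hk' => ?_⟩
          · rcases List.mem_cons.mp hk' with h | h
            · subst h; exact hc
            · exact h1 k' h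
          · exact List.mem_cons_of_mem _ (h2 k' hk')
        · rintro ⟨h1, h2⟩
          refine ⟨fun k' hk' => h1 k' (List.mem_cons_of_mem _ hk'), fun k' hk' => ?_⟩
          rcases List.mem_cons.mp (h2 k' hk') with h | h
          · subst h; rw [hget] at hk'; exact absurd hk' (by simp)
          · exact h
      | true =>
        simp only [if_true]
        have hnd' : (status.insert k false).keys.Nodup := PySem.Dict.nodup_keys_insert _ _ _ hnd
        have hinv' : need = (count + 1) + pvTval (status.insert k false) := by
          have := pvTval_insert_false status k hnd hget
          omega
        rw [ih (status.insert k false) (count + 1) need hnd' hinv']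
        constructor
        · rintro ⟨h1, h2⟩
          refine ⟨fun k' hk' => ?_, fun k' hk' => ?_⟩
          · rcases List.mem_cons.mp hk' with h | h
            · subst h; exact hc
            · have := h1 k' h
              rw [PySem.Dict.contains_insert] at this
              rcases Bool.or_eq_true_iff.mp this with h' | h'
              · have : k' = k := by simpa using h'
                subst this; exact hc
              · exact h'
          · by_cases hkk : k' = k
            · subst hkk; exact List.mem_cons_self
            · refine List.mem_cons_of_mem _ (h2 k' ?_)
              rw [PySem.Dict.get?_insert, if_neg hkk]; exact hk'
        · rintro ⟨h1, h2⟩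
          refine ⟨fun k' hk' => ?_, fun k' hk' => ?_⟩
          · rw [PySem.Dict.contains_insert]
            exact Bool.or_eq_true_iff.mpr (Or.inr (h1 k' (List.mem_cons_of_mem _ hk')))
          · rw [PySem.Dict.get?_insert] at hk'
            by_cases hkk : k' = k
            · rw [if_pos hkk] at hk'; exact absurd hk' (by simp)
            · rw [if_neg hkk] at hk'
              rcases List.mem_cons.mp (h2 k' hk') with h | h
              · exact absurd h hkk
              · exact h

-- Source B's 'need' is the number of True entries of the freshly built table
theorem pvNeed_eq_Tval (status : PySem.Dict String Bool) :
    (status.values.map (fun b => if b then (1 : Int) else 0)).sum = pvTval status := by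
  unfold pvTval
  rw [PySem.Dict.values]
  induction status.items with
  | nil => simp
  | cons p rest ih =>
    rw [List.map_map] at ih
    simp only [List.map_cons, List.map_map, List.sum_cons, List.filter_cons]
    cases hp : p.2
    · simp [ih]
    · simp [← ih]
      omega

-- ===== VERDICT (by name: the statement is the Claim_ definition above) =====
theorem checkPostRequest_spec : Claim_equal_checkPostRequest := by
  intro data required_keys optional_keys _
  unfold Spec_checkPostRequest checkPostRequest checkPostRequest_alt
  set dkeys := data.map (fun kv => kv.1) with hdk
  set status := pvBuildStatus required_keys optional_keys with hst
  have hchar := pvDataLoop_char dkeys status 0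
    ((status.values.map (fun b => if b then (1 : Int) else 0)).sum)
    (pvNodup_buildStatus _ _) (by rw [pvNeed_eq_Tval]; ring)
  rw [Bool.eq_iff_iff]
  simp only [pvReqLoop_eq_all, pvAllLoop_eq_all]
  rw [hchar]
  constructor
  · intro h
    split_ifs at h with hreq
    · simp only [List.all_eq_true, List.contains_iff_mem, List.mem_append] at h hreq
      refine ⟨fun k hk => ?_, fun k hk => ?_⟩
      · rw [PySem.Dict.contains_eq_isSome_get?, hst, pvGet_buildStatus]
        rcases h k hk with h' | h'
        · simp [h']
        · by_cases hr : k ∈ required_keys <;> simp [hr, h']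
      · rw [hst, pvGet_buildStatus] at hk
        split_ifs at hk with h1 h2
        · exact hreq k h1
        · exact absurd hk (by simp)
  · rintro ⟨h1, h2⟩
    have hreq : required_keys.all (fun k => dkeys.contains k) = true := by
      simp only [List.all_eq_true, List.contains_iff_mem]
      intro k hk
      refine h2 k ?_
      rw [hst, pvGet_buildStatus, if_pos hk]
    rw [if_pos hreq]
    simp only [List.all_eq_true, List.contains_iff_mem, List.mem_append]
    intro k hk
    have := h1 k hk
    rw [PySem.Dict.contains_eq_isSome_get?, hst, pvGet_buildStatus] at this
    split_ifs at this with ha hb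
    · exact Or.inl ha
    · exact Or.inr hb
    · exact absurd this (by simp)
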